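-- pv_equiv track=rewrite | github.com/Arttacker/CipherSecurity | encryption/classic/columnar.py | calculate_columns_number
-- ===== SOURCE A (Python) =====
-- from collections import defaultdict
--
-- def calculate_columns_number(plain_text: str, cipher_text: str) -> int:
--     occurrence = defaultdict(int)
--
--     for letter in plain_text:
--         occurrence[letter] += 1
--
--     most_freq_col_num = 1  # Set a minimum of 1 column
--     freq = defaultdict(int)
--
--     for i in range(1, len(cipher_text)):
--         index_before = plain_text.find(cipher_text[i - 1])
--         for j in range(occurrence[cipher_text[i - 1]] - 1):
--             temp = plain_text.find(cipher_text[i - 1], index_before + 1)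
--             index_before = temp if temp != -1 else index_before
--
--         occurrence[cipher_text[i]] += 1
--         index_present = plain_text.find(cipher_text[i])
--         for j in range(occurrence[cipher_text[i]] - 1):
--             temp = plain_text.find(cipher_text[i], index_present + 1)
--             index_present = temp if temp != -1 else index_present
--
--         distance = index_present - index_before if index_present > index_before else index_before - index_present
--
--         freq[distance] += 1
--         most_freq_col_num = max(1, distance) if freq[distance] > freq[most_freq_col_num] else most_freq_col_num
--
--     return most_freq_col_num
-- ===== SOURCE B (Python) =====
-- def calculate_columns_number(plain_text: str, cipher_text: str) -> int:
--     # A's repeated-find scans always settle on the LAST occurrence of the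
--     # character in plain_text (or -1 if absent), because the occurrence
--     # counter starts at the full plaintext count; precompute that once.
--     last = {}
--     for i, ch in enumerate(plain_text):
--         last[ch] = i
--
--     best = 1
--     freq = {}
--     for prev, cur in zip(cipher_text, cipher_text[1:]):
--         d = abs(last.get(cur, -1) - last.get(prev, -1))
--         freq[d] = freq.get(d, 0) + 1
--         if freq[d] > freq.get(best, 0):
--             best = max(1, d)
--     return best
-- ===== Notes on version B (the rewrite author's own statement) =====
-- stated objective: faster
-- what changed: B replaces A's per-pair occurrence counting plus repeated str.find scans (which provably always converge to the last occurrence of the character) with a single precomputed last-index dictionary and one zip pass over adjacent ciphertext characters.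
import Mathlib
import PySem

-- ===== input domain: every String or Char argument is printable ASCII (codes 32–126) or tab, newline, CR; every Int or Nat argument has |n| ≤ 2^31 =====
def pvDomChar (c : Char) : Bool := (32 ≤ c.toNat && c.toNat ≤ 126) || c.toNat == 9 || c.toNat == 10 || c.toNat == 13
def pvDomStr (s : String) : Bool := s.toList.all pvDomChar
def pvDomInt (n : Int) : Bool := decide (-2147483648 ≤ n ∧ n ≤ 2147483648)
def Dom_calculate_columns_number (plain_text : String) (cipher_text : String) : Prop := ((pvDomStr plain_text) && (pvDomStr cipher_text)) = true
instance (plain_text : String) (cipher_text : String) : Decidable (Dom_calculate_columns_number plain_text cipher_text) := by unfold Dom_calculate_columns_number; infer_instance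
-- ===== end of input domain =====

-- B replaces A's repeated str.find scans (which always converge to the last occurrence
-- of the character in plain_text) by a precomputed last-index dictionary and one zip
-- pass over adjacent ciphertext characters; objective: faster (asymptotic).


-- ===== PORT A =====
-- one step of A's inner loop: temp = plain.find(c, idx+1); idx = temp if temp != -1 else idx
def pvFindStep (pl : List Char) (c : Char) (ib : Int) : Int :=
  let temp := PySem.Chars.findFrom pl [c] (ib + 1) none
  if temp ≠ -1 then temp else ib

-- A's inner loop: for j in range(n): idx = step(idx)
def pvScan (pl : List Char) (c : Char) (n : Int) (start : Int) : Int :=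
  (PySem.List.pyRange 0 n 1).foldl (fun ib _ => pvFindStep pl c ib) start

-- the body of A's outer loop (cb = cipher_text[i-1], cp = cipher_text[i]);
-- state = (occurrence, freq, most_freq_col_num)
def pvABody (pl : List Char) (st : PySem.Dict Char Int × PySem.Dict Int Int × Int)
    (cb cp : Char) : PySem.Dict Char Int × PySem.Dict Int Int × Int :=
  let index_before := pvScan pl cb (st.1.getD cb 0 - 1) (PySem.Chars.find pl [cb])
  let occurrence := st.1.modify cp 0 (· + 1)
  let index_present := pvScan pl cp (occurrence.getD cp 0 - 1) (PySem.Chars.find pl [cp])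
  let distance := if index_present > index_before then index_present - index_before
                  else index_before - index_present
  let freq := st.2.1.modify distance 0 (· + 1)
  let most := if freq.getD distance 0 > freq.getD st.2.2 0 then max 1 distance else st.2.2
  (occurrence, freq, most)

def calculate_columns_number (plain_text : String) (cipher_text : String) : Int :=
  let pl := plain_text.toList
  let ct := cipher_text.toList
  let occurrence : PySem.Dict Char Int :=
    pl.foldl (fun d letter => d.modify letter 0 (· + 1)) PySem.Dict.empty
  ((PySem.List.pyRange 1 (PySem.Str.len cipher_text) 1).foldl
      (fun st i => pvABody pl st (PySem.List.pyGetD ct (i - 1) ' ') (PySem.List.pyGetD ct i ' '))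
      (occurrence, PySem.Dict.empty, 1)).2.2

-- ===== PORT B =====
-- the body of B's loop over adjacent pairs; state = (freq, best)
def pvBBody (last : PySem.Dict Char Int) (st : PySem.Dict Int Int × Int)
    (prev cur : Char) : PySem.Dict Int Int × Int :=
  let d := |last.getD cur (-1) - last.getD prev (-1)|
  let freq := st.1.modify d 0 (· + 1)
  let best := if freq.getD d 0 > freq.getD st.2 0 then max 1 d else st.2
  (freq, best)

def calculate_columns_number_alt (plain_text : String) (cipher_text : String) : Int :=
  let pl := plain_text.toList
  let ct := cipher_text.toList
  let last : PySem.Dict Char Int :=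
    (PySem.List.enumerate pl 0).foldl (fun d p => d.insert p.2 p.1) PySem.Dict.empty
  ((ct.zip (PySem.List.slice ct (some 1) none)).foldl
      (fun st p => pvBBody last st p.1 p.2) (PySem.Dict.empty, 1)).2

-- ===== PRECONDITION & SPEC =====
def Spec_calculate_columns_number (plain_text : String) (cipher_text : String) (out : Int) : Prop := out = calculate_columns_number_alt plain_text cipher_text
instance (plain_text : String) (cipher_text : String) (out : Int) : Decidable (Spec_calculate_columns_number plain_text cipher_text out) := by unfold Spec_calculate_columns_number; infer_instance

-- ===== CLAIM (what is proved, stated in full; the proofs are below) =====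
def Claim_equal_calculate_columns_number : Prop := ∀ (plain_text : String) (cipher_text : String), Dom_calculate_columns_number plain_text cipher_text → Spec_calculate_columns_number plain_text cipher_text (calculate_columns_number plain_text cipher_text)

-- ===== LEMMAS AND PROOFS =====

-- the (sorted) list of positions of c in cs, indices starting at k
def pvPos (c : Char) : List Char → Int → List Int
  | [], _ => []
  | x :: t, k => if x = c then k :: pvPos c t (k + 1) else pvPos c t (k + 1)

lemma mem_pvPos {c : Char} {cs : List Char} {k i : Int} :
    i ∈ pvPos c cs k ↔ ∃ j : Nat, i = k + j ∧ cs[j]? = some c := by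
  induction cs generalizing k with
  | nil => simp [pvPos]
  | cons x t ih =>
    simp only [pvPos]
    constructor
    · intro h
      by_cases hx : x = c
      · simp only [if_pos hx] at h
        rcases List.mem_cons.1 h with h | h
        · exact ⟨0, by simpa [hx] using h⟩
        · rcases ih.1 h with ⟨j, hj1, hj2⟩
          exact ⟨j + 1, by push_cast; omega, by simpa using hj2⟩
      · simp only [if_neg hx] at h
        rcases ih.1 h with ⟨j, hj1, hj2⟩
        exact ⟨j + 1, by omega, by simpa using hj2⟩
    · rintro ⟨j, hj1, hj2⟩
      cases j with
      | zero =>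
        simp at hj2
        simp [hj2]
        omega
      | succ j' =>
        simp at hj2
        have : i ∈ pvPos c t (k + 1) := ih.2 ⟨j', by omega, hj2⟩
        by_cases hx : x = c <;> simp [hx, this]

lemma le_of_mem_pvPos {c : Char} {cs : List Char} {k i : Int} (h : i ∈ pvPos c cs k) : k ≤ i := by
  rcases mem_pvPos.1 h with ⟨j, hj, -⟩; omega

lemma pairwise_pvPos (c : Char) (cs : List Char) (k : Int) :
    (pvPos c cs k).Pairwise (· < ·) := by
  induction cs generalizing k with
  | nil => simp [pvPos]
  | cons x t ih =>
    by_cases hx : x = c <;> simp only [pvPos, if_pos, hx]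
    · refine List.Pairwise.cons (fun y hy => ?_) (ih (k + 1))
      have := le_of_mem_pvPos hy; omega
    · exact ih (k + 1)

lemma length_pvPos (c : Char) (cs : List Char) (k : Int) :
    (pvPos c cs k).length = cs.count c := by
  induction cs generalizing k with
  | nil => simp [pvPos]
  | cons x t ih =>
    by_cases hx : x = c <;>
      simp [pvPos, hx, ih]

lemma pvPos_eq_nil_iff {c : Char} {cs : List Char} {k : Int} :
    pvPos c cs k = [] ↔ c ∉ cs := by
  rw [← List.length_eq_zero_iff, length_pvPos, List.count_eq_zero]

-- [c] is a prefix of l iff l's head is c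
lemma singleton_prefix_iff {c : Char} {l : List Char} :
    [c] <+: l ↔ l.head? = some c := by
  cases l with
  | nil => simp
  | cons x t =>
    constructor
    · rintro ⟨r, hr⟩
      simp at hr
      simp [hr.1]
    · intro h
      simp at h
      exact ⟨t, by simp [h]⟩

lemma singleton_infix_iff {c : Char} {l : List Char} : [c] <:+: l ↔ c ∈ l := by
  constructor
  · intro h
    have := h.subset; simpa using this
  · intro h
    rcases List.mem_iff_append.1 h with ⟨s, t, rfl⟩
    exact ⟨s, t, by simp⟩

lemma prefix_drop_iff {c : Char} {l : List Char} {m : Nat} :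
    [c] <+: l.drop m ↔ l[m]? = some c := by
  rw [singleton_prefix_iff, List.head?_drop]

-- find? on a sorted list returns the least element satisfying (b <= .)
lemma find?_sorted_least {ps : List Int} (hps : ps.Pairwise (· < ·)) {b y : Int}
    (hy : y ∈ ps) (hyb : b ≤ y) (hleast : ∀ z ∈ ps, b ≤ z → y ≤ z) :
    ps.find? (fun x => decide (b ≤ x)) = some y := by
  induction ps with
  | nil => simp at hy
  | cons h t ih =>
    by_cases hbh : b ≤ h
    · have hyh : y = h := by
        have h1 : y ≤ h := hleast h (by simp) hbh
        rcases List.mem_cons.1 hy with rfl | hyt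
        · rfl
        · have := (List.pairwise_cons.1 hps).1 y hyt; omega
      rw [List.find?_cons_of_pos (by simpa using hbh), hyh]
    · have hyt : y ∈ t := by
        rcases List.mem_cons.1 hy with rfl | hyt
        · omega
        · exact hyt
      rw [List.find?_cons_of_neg (by simpa using hbh)]
      exact ih (List.pairwise_cons.1 hps).2 hyt (fun z hz hbz => hleast z (by simp [hz]) hbz)

lemma find?_sorted_none {ps : List Int} {b : Int}
    (h : ∀ z ∈ ps, ¬ b ≤ z) : ps.find? (fun x => decide (b ≤ x)) = none := by
  rw [List.find?_eq_none]
  intro x hx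
  simpa using h x hx

-- findFrom at a natural bound b = first position ≥ b in pvPos (or -1)
lemma findFrom_pvPos (cs : List Char) (c : Char) (b : Nat) (hb : b ≤ cs.length) :
    PySem.Chars.findFrom cs [c] (b : Int) none
      = ((pvPos c cs 0).find? (fun x => decide ((b : Int) ≤ x))).getD (-1) := by
  rw [PySem.Chars.findFrom_natCast cs [c] b hb]
  by_cases hmem : c ∈ cs.drop b
  · have h0 : 0 ≤ PySem.Chars.find (cs.drop b) [c] :=
      (PySem.Chars.find_nonneg_iff _ _).2 (singleton_infix_iff.2 hmem)
    obtain ⟨hpre, hmin⟩ := PySem.Chars.find_spec h0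
    set r := PySem.Chars.find (cs.drop b) [c] with hr
    have hgr : cs[b + r.toNat]? = some c := by
      rw [List.drop_drop] at hpre
      exact prefix_drop_iff.1 hpre
    have hymem : ((b : Int) + r) ∈ pvPos c cs 0 :=
      mem_pvPos.2 ⟨b + r.toNat, by push_cast; omega, hgr⟩
    have hfind : (pvPos c cs 0).find? (fun x => decide ((b : Int) ≤ x))
        = some ((b : Int) + r) := by
      apply find?_sorted_least (pairwise_pvPos c cs 0) hymem (by omega)
      intro z hz hbz
      rcases mem_pvPos.1 hz with ⟨j, hzj, hj⟩
      by_contra hlt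
      push Not at hlt
      have : ¬ [c] <+: (cs.drop b).drop (j - b) := hmin (j - b) (by omega)
      rw [List.drop_drop, prefix_drop_iff, show b + (j - b) = j by omega] at this
      exact this hj
    rw [hfind]
    simp only [Option.getD_some]
    rw [if_neg (by omega)]
  · have hneg : PySem.Chars.find (cs.drop b) [c] = -1 :=
      (PySem.Chars.find_eq_neg_one_iff _ _).2 (fun h => hmem (singleton_infix_iff.1 h))
    rw [hneg, if_pos rfl, find?_sorted_none]
    · simp
    · intro z hz hbz
      rcases mem_pvPos.1 hz with ⟨j, hzj, hj⟩
      apply hmem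
      rw [List.mem_iff_getElem?]
      exact ⟨j - b, by rw [List.getElem?_drop, show b + (j - b) = j by omega]; exact hj⟩

-- a fold that ignores the list elements is an iterate
lemma foldl_fun_const {α β : Type} (l : List β) (g : α → α) :
    ∀ a, l.foldl (fun x _ => g x) a = g^[l.length] a := by
  induction l with
  | nil => intro a; simp
  | cons x t ih =>
    intro a
    rw [List.foldl_cons, ih, List.length_cons, ← Function.iterate_succ_apply]

lemma pvScan_eq_iterate (pl : List Char) (c : Char) (n : Int) (s : Int) :
    pvScan pl c n s = (pvFindStep pl c)^[n.toNat] s := by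
  unfold pvScan
  rw [PySem.List.pyRange_one, List.foldl_map, foldl_fun_const]
  simp

-- one inner-loop step moves from position j to position j+1 (or stays at the last)
lemma step_getElem (pl : List Char) (c : Char) (j : Nat)
    (hj : j < (pvPos c pl 0).length) :
    pvFindStep pl c (pvPos c pl 0)[j]
      = if h : j + 1 < (pvPos c pl 0).length then (pvPos c pl 0)[j + 1]
        else (pvPos c pl 0)[j] := by
  have hsorted := pairwise_pvPos c pl 0
  obtain ⟨jj, hjj, hget⟩ : ∃ jj : Nat, (pvPos c pl 0)[j] = (jj : Int) ∧ pl[jj]? = some c := by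
    rcases mem_pvPos.1 (List.getElem_mem hj) with ⟨jj, h1, h2⟩
    exact ⟨jj, by omega, h2⟩
  have hjlen : jj < pl.length := by
    by_contra hh
    push Not at hh
    rw [List.getElem?_eq_none (by omega)] at hget
    cases hget
  have h0j : (0 : Int) ≤ (pvPos c pl 0)[j] := by omega
  have hb : ((pvPos c pl 0)[j] + 1).toNat ≤ pl.length := by omega
  unfold pvFindStep
  rw [show (pvPos c pl 0)[j] + 1 = ((((pvPos c pl 0)[j] + 1).toNat : Nat) : Int) by omega]
  rw [findFrom_pvPos pl c _ hb]
  by_cases hlt : j + 1 < (pvPos c pl 0).length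
  · have hnext : (pvPos c pl 0)[j] < (pvPos c pl 0)[j + 1] :=
      List.pairwise_iff_getElem.1 hsorted j (j + 1) hj hlt (by omega)
    have hfind : (pvPos c pl 0).find?
          (fun x => decide (((((pvPos c pl 0)[j] + 1).toNat : Nat) : Int) ≤ x))
        = some (pvPos c pl 0)[j + 1] := by
      apply find?_sorted_least hsorted (List.getElem_mem hlt) (by omega)
      intro z hz hbz
      rcases List.mem_iff_getElem.1 hz with ⟨i, hi, rfl⟩
      rcases Nat.lt_or_ge i (j + 1) with hij | hij
      · have hle : (pvPos c pl 0)[i] ≤ (pvPos c pl 0)[j] := by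
          rcases Nat.lt_or_ge i j with h' | h'
          · exact le_of_lt (List.pairwise_iff_getElem.1 hsorted i j hi hj h')
          · have hij' : i = j := by omega
            subst hij'
            exact le_refl _
        omega
      · rcases Nat.eq_or_lt_of_le hij with h' | h'
        · subst h'
          exact le_refl _
        · exact le_of_lt (List.pairwise_iff_getElem.1 hsorted (j + 1) i hlt hi h')
    rw [hfind]
    simp only [Option.getD_some]
    have hpos : (0 : Int) ≤ (pvPos c pl 0)[j + 1] := le_of_mem_pvPos (List.getElem_mem hlt)
    rw [dif_pos hlt, if_pos (by omega)]
  · have hfind : (pvPos c pl 0).find?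
          (fun x => decide (((((pvPos c pl 0)[j] + 1).toNat : Nat) : Int) ≤ x)) = none := by
      apply find?_sorted_none
      intro z hz hbz
      rcases List.mem_iff_getElem.1 hz with ⟨i, hi, rfl⟩
      have hle : (pvPos c pl 0)[i] ≤ (pvPos c pl 0)[j] := by
        rcases Nat.lt_or_ge i j with h' | h'
        · exact le_of_lt (List.pairwise_iff_getElem.1 hsorted i j hi hj h')
        · have hij' : i = j := by omega
          subst hij'
          exact le_refl _
      omega
    rw [hfind]
    simp only [Option.getD_none]
    rw [dif_neg hlt, if_neg (by simp)]

-- iterating the step at least (length - 1 - j) times from position j lands on the last position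
lemma iterate_last (pl : List Char) (c : Char) :
    ∀ (n j : Nat) (hj : j < (pvPos c pl 0).length),
      (pvPos c pl 0).length - 1 - j ≤ n →
      (pvFindStep pl c)^[n] (pvPos c pl 0)[j] = (pvPos c pl 0).getLastD (-1) := by
  intro n
  induction n with
  | zero =>
    intro j hj hn
    have hj' : (pvPos c pl 0).length - 1 = j := by omega
    simp only [Function.iterate_zero, id_eq]
    rw [List.getLastD_eq_getLast?, List.getLast?_eq_getElem?, hj',
      List.getElem?_eq_getElem hj]
    rfl
  | succ n ih =>
    intro j hj hn
    rw [Function.iterate_succ_apply, step_getElem pl c j hj]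
    by_cases hlt : j + 1 < (pvPos c pl 0).length
    · rw [dif_pos hlt]
      exact ih (j + 1) hlt (by omega)
    · rw [dif_neg hlt]
      exact ih j hj (by omega)

-- A's inner scan, run at least (count - 1) times from find, yields the last position
lemma scan_eq_last (pl : List Char) (c : Char) (n : Int)
    (hn : (pl.count c : Int) - 1 ≤ n) :
    pvScan pl c n (PySem.Chars.find pl [c]) = (pvPos c pl 0).getLastD (-1) := by
  rw [pvScan_eq_iterate]
  by_cases hc : c ∈ pl
  · have hne : pvPos c pl 0 ≠ [] := fun h => (pvPos_eq_nil_iff.1 h) hc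
    have hlen : 0 < (pvPos c pl 0).length := List.length_pos_of_ne_nil hne
    have hfind : PySem.Chars.find pl [c] = (pvPos c pl 0)[0] := by
      have hff := findFrom_pvPos pl c 0 (by omega)
      simp only [Nat.cast_zero] at hff
      rw [← PySem.Chars.findFrom_zero, hff]
      rw [find?_sorted_least (pairwise_pvPos c pl 0) (List.getElem_mem hlen)
        (by simpa using le_of_mem_pvPos (List.getElem_mem hlen))
        (fun z hz hbz => by
          rcases List.mem_iff_getElem.1 hz with ⟨i, hi, rfl⟩
          rcases Nat.eq_zero_or_pos i with h' | h'
          · subst h'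
            exact le_refl _
          · exact le_of_lt
              (List.pairwise_iff_getElem.1 (pairwise_pvPos c pl 0) 0 i hlen hi h'))]
      rfl
    rw [hfind]
    have hcnt : (pvPos c pl 0).length = pl.count c := length_pvPos c pl 0
    exact iterate_last pl c n.toNat 0 hlen (by omega)
  · have hnil : pvPos c pl 0 = [] := pvPos_eq_nil_iff.2 hc
    have hfind : PySem.Chars.find pl [c] = -1 :=
      (PySem.Chars.find_eq_neg_one_iff _ _).2 (fun h => hc (singleton_infix_iff.1 h))
    rw [hnil, hfind]
    simp only [List.getLastD_nil]
    apply Function.iterate_fixed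
    unfold pvFindStep
    rw [show (-1 : Int) + 1 = 0 by norm_num, PySem.Chars.findFrom_zero, hfind]
    simp

-- Python's branch form of the distance is the absolute value
lemma if_gt_abs (a b : Int) : (if b > a then b - a else a - b) = |b - a| := by
  rcases lt_or_ge a b with h | h
  · rw [if_pos h, abs_of_pos (by omega)]
  · rw [if_neg (by omega), abs_of_nonpos (by omega)]
    omega

-- B's last-index dictionary agrees with pvPos's last element
lemma lastDict (cs : List Char) : ∀ (s : Int) (d : PySem.Dict Char Int) (c : Char),
    ((PySem.List.enumerate cs s).foldl (fun d p => d.insert p.2 p.1) d).getD c (-1)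
      = (pvPos c cs s).getLastD (d.getD c (-1)) := by
  induction cs with
  | nil => intro s d c; simp [PySem.List.enumerate_nil, pvPos]
  | cons x t ih =>
    intro s d c
    rw [PySem.List.enumerate_cons]
    simp only [List.foldl_cons]
    rw [ih (s + 1) (d.insert x s) c]
    by_cases hx : x = c
    · subst hx
      rw [PySem.Dict.getD_insert_self]
      simp only [pvPos, if_true]
      rw [List.getLastD_cons]
    · rw [PySem.Dict.getD_insert_of_ne d s (-1) (fun h => hx h.symm)]
      simp [pvPos, hx]

-- index loop over adjacent elements = fold over zip with tail
lemma foldl_range_pairs {σ α : Type} (xs : List α) (d : α) (f : σ → α → α → σ) :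
    ∀ (m k : Nat) (s : σ), xs.length - k = m →
      (PySem.List.pyRange ((k : Int) + 1) (xs.length : Int) 1).foldl
          (fun s i => f s (PySem.List.pyGetD xs (i - 1) d) (PySem.List.pyGetD xs i d)) s
        = ((xs.drop k).zip (xs.drop (k + 1))).foldl (fun s p => f s p.1 p.2) s := by
  intro m
  induction m with
  | zero =>
    intro k s hk
    rw [PySem.List.pyRange_one_eq_nil (by omega)]
    rw [List.drop_eq_nil_of_le (as := xs) (i := k) (by omega)]
    simp
  | succ m ih =>
    intro k s hk
    by_cases hlt : k + 1 < xs.length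
    · have hk1 : k < xs.length := by omega
      rw [PySem.List.pyRange_one_cons (by exact_mod_cast hlt)]
      rw [List.drop_eq_getElem_cons hlt, List.drop_eq_getElem_cons hk1]
      simp only [List.foldl_cons, List.zip_cons_cons]
      have e1 : ((k : Int) + 1 - 1) = ((k : Nat) : Int) := by omega
      have e2 : (PySem.List.pyGetD xs ((k : Int) + 1) d) = xs[k + 1] := by
        rw [show ((k : Int) + 1) = ((k + 1 : Nat) : Int) by push_cast; ring]
        rw [PySem.List.pyGetD_natCast]
        exact List.getD_eq_getElem xs d hlt
      rw [e1, PySem.List.pyGetD_natCast, List.getD_eq_getElem xs d hk1, e2]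
      have := ih (k + 1) (f s xs[k] xs[k + 1]) (by omega)
      rw [show (((k + 1 : Nat) : Int) + 1) = ((k : Int) + 1 + 1) by push_cast; ring] at this
      exact this
    · rw [PySem.List.pyRange_one_eq_nil (by omega)]
      rw [List.drop_eq_nil_of_le (as := xs) (i := k + 1) (by omega)]
      simp

-- the outer folds agree, given the occurrence-count invariant and a faithful last dict
lemma outer_fold (pl : List Char) (L : PySem.Dict Char Int)
    (hL : ∀ c, L.getD c (-1) = (pvPos c pl 0).getLastD (-1)) :
    ∀ (P : List (Char × Char)) (occ : PySem.Dict Char Int)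
      (freq : PySem.Dict Int Int) (most : Int),
      (∀ x, (pl.count x : Int) ≤ occ.getD x 0) →
      (P.foldl (fun st p => pvABody pl st p.1 p.2) (occ, freq, most)).2
        = P.foldl (fun st p => pvBBody L st p.1 p.2) (freq, most) := by
  intro P
  induction P with
  | nil => intro occ freq most _; rfl
  | cons p t ih =>
    intro occ freq most hinv
    simp only [List.foldl_cons]
    have hA : pvABody pl (occ, freq, most) p.1 p.2
        = (occ.modify p.2 0 (· + 1),
           (pvBBody L (freq, most) p.1 p.2).1, (pvBBody L (freq, most) p.1 p.2).2) := by
      simp only [pvABody, pvBBody]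
      rw [scan_eq_last pl p.1 _ (by have := hinv p.1; omega)]
      rw [PySem.Dict.getD_modify, if_pos rfl]
      rw [scan_eq_last pl p.2 _ (by have := hinv p.2; omega)]
      rw [hL p.1, hL p.2, if_gt_abs]
    rw [hA]
    have hinv' : ∀ x, (pl.count x : Int) ≤ (occ.modify p.2 0 (· + 1)).getD x 0 := by
      intro x
      rw [PySem.Dict.getD_modify]
      by_cases hx : x = p.2
      · rw [if_pos hx]
        have := hinv x
        subst hx
        omega
      · rw [if_neg hx]
        exact hinv x
    exact ih (occ.modify p.2 0 (· + 1)) (pvBBody L (freq, most) p.1 p.2).1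
      (pvBBody L (freq, most) p.1 p.2).2 hinv'

-- ===== VERDICT (by name: the statement is the Claim_ definition above) =====
theorem calculate_columns_number_spec : Claim_equal_calculate_columns_number := by
  unfold Claim_equal_calculate_columns_number Spec_calculate_columns_number
  intro plain cipher _
  unfold calculate_columns_number calculate_columns_number_alt
  simp only [PySem.Str.len_eq, PySem.List.slice_from_one, List.zip_eq_zipWith]
  have hbridge := fun s =>
    foldl_range_pairs cipher.toList ' ' (pvABody plain.toList) cipher.toList.length 0 s rfl
  simp only [Nat.cast_zero, zero_add, List.drop_zero, List.drop_one] at hbridge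
  rw [hbridge]
  have hL : ∀ c, ((PySem.List.enumerate plain.toList 0).foldl
      (fun d p => d.insert p.2 p.1) PySem.Dict.empty).getD c (-1)
        = (pvPos c plain.toList 0).getLastD (-1) := by
    intro c
    rw [lastDict plain.toList 0 PySem.Dict.empty c, PySem.Dict.getD_empty]
  have hinv : ∀ x, (plain.toList.count x : Int) ≤
      (plain.toList.foldl (fun d letter => d.modify letter 0 (· + 1))
        PySem.Dict.empty).getD x 0 := by
    intro x
    rw [PySem.Dict.getD_foldl_modify_add_one, PySem.Dict.getD_empty]
    omega
  exact congrArg Prod.snd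
    (outer_fold plain.toList _ hL (cipher.toList.zip cipher.toList.tail)
      _ PySem.Dict.empty 1 hinv)
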